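-- pv_equiv track=rewrite | github.com/TOMATOsJr/Text2Table | Post mid sub files _ rough/kg_to_table_csv.py | aggregate_attributes
-- ===== SOURCE A (Python) =====
-- from collections import defaultdict
--
-- SINGLE_VALUED_ATTRS: set[str] = {
--     "name", "fullname", "birth_name",
--     "birth_date", "birth_place",
--     "death_date", "death_place", "death_cause",
--     "gender", "nationality", "religion",
-- }
--
-- def deduplicate_values(values: list[str]) -> list[str]:
--     if not values:
--         return values
--
--     seen_lower: set[str] = set()
--     unique: list[str] = []
--     for value in values:
--         value = value.strip()
--         if not value:
--             continue
--         value_lower = value.lower()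
--         if value_lower not in seen_lower:
--             seen_lower.add(value_lower)
--             unique.append(value)
--
--     if len(unique) <= 1:
--         return unique
--
--     sorted_by_length = sorted(unique, key=len, reverse=True)
--     kept: list[str] = []
--     for value in sorted_by_length:
--         value_lower = value.lower()
--         absorbed = any(
--             value_lower in accepted.lower() and value_lower != accepted.lower()
--             for accepted in kept
--         )
--         if not absorbed:
--             kept.append(value)
--
--     return kept
--
-- def pick_best_single_value(values: list[str]) -> str:
--     if not values:
--         return ""
--     return max(values, key=len)
--
-- def aggregate_attributes(attr_value_pairs: list[tuple[str, str]]) -> dict[str, list[str]]: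
--     grouped: defaultdict[str, list[str]] = defaultdict(list)
--     for attribute, value in attr_value_pairs:
--         grouped[attribute].append(value)
--
--     result: dict[str, list[str]] = {}
--     for attribute, values in grouped.items():
--         deduped = deduplicate_values(values)
--         if not deduped:
--             continue
--
--         if attribute in SINGLE_VALUED_ATTRS:
--             result[attribute] = [pick_best_single_value(deduped)]
--         else:
--             result[attribute] = deduped
--
--     return result
-- ===== SOURCE B (Python) =====
-- SINGLE_VALUED_ATTRS: set[str] = {
--     "name", "fullname", "birth_name",
--     "birth_date", "birth_place",
--     "death_date", "death_place", "death_cause",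
--     "gender", "nationality", "religion",
-- }
--
-- def _unique_values(values: list[str]) -> list[str]:
--     """First occurrence per lowercase form, stripped, empties dropped."""
--     seen: set[str] = set()
--     unique: list[str] = []
--     for value in values:
--         value = value.strip()
--         value_lower = value.lower()
--         if value and value_lower not in seen:
--             seen.add(value_lower)
--             unique.append(value)
--     return unique
--
-- def _survivors(unique: list[str]) -> list[str]:
--     """Length-descending order; drop any value whose lowercase form is a
--     proper substring of any other value's lowercase form in the list."""
--     ordered = sorted(unique, key=len, reverse=True)
--     return [v for v in ordered
--             if not any(v.lower() in u.lower() and v.lower() != u.lower()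
--                        for u in ordered)]
--
-- def aggregate_attributes(attr_value_pairs: list[tuple[str, str]]) -> dict[str, list[str]]:
--     grouped: dict[str, list[str]] = {}
--     for attribute, value in attr_value_pairs:
--         grouped.setdefault(attribute, []).append(value)
--
--     result: dict[str, list[str]] = {}
--     for attribute, values in grouped.items():
--         keep = _survivors(_unique_values(values))
--         if not keep:
--             continue
--         if attribute in SINGLE_VALUED_ATTRS:
--             result[attribute] = [max(keep, key=len)]
--         else:
--             result[attribute] = keep
--     return result
-- ===== Notes on version B (the rewrite author's own statement) =====
-- stated objective: alternative
-- what changed: The greedy accumulator absorption loop (check each value against the growing kept list) is replaced by a declarative filter over the whole length-descending list (keep a value iff its lowercase form is a proper substring of no other value's), the len<=1 shortcut and empty-list guards disappear, and the single-valued pick is a plain max over the survivors; equivalence rests on absorption being transitive along strictly increasing lengths.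
import Mathlib
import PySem

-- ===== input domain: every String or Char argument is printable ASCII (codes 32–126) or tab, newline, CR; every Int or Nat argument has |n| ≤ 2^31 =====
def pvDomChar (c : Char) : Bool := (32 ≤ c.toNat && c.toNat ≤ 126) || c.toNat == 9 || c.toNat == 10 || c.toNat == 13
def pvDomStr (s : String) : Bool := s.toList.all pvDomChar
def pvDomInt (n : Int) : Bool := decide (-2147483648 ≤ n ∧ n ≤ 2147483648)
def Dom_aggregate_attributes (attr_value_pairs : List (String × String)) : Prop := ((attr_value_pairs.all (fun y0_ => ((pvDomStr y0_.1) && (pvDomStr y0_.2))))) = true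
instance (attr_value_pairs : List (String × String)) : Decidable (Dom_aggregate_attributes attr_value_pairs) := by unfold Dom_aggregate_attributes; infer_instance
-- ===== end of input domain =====

-- B replaces A's greedy absorption accumulator by a filter of the length-descending list
-- against the whole list (plus a plain max for single-valued attributes): an alternative
-- decomposition of the same cost, proved equal via transitivity of proper-substring absorption.

-- ===== PORT A =====
def SINGLE_VALUED_ATTRS : PySem.Set String :=
  PySem.Set.ofList ["name", "fullname", "birth_name",
    "birth_date", "birth_place",
    "death_date", "death_place", "death_cause",
    "gender", "nationality", "religion"]

def deduplicate_values (values : List String) : List String :=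
  if values = [] then values
  else
    let st := values.foldl (fun (st : PySem.Set String × List String) value =>
      let value := PySem.Str.strip value
      if value = "" then st
      else
        let value_lower := PySem.Str.lower value
        if PySem.Set.contains st.1 value_lower then st
        else (PySem.Set.add st.1 value_lower, st.2 ++ [value])) (PySem.Set.empty, [])
    let unique := st.2
    if unique.length ≤ 1 then unique
    else
      let sorted_by_length := PySem.List.sorted unique (fun s => PySem.Str.len s) true
      sorted_by_length.foldl (fun kept value =>
        let value_lower := PySem.Str.lower value
        let absorbed := kept.any (fun accepted =>
          PySem.Str.isIn value_lower (PySem.Str.lower accepted) &&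
            !(value_lower == PySem.Str.lower accepted))
        if absorbed then kept else kept ++ [value]) []

def pick_best_single_value (values : List String) : String :=
  if values = [] then ""
  else (PySem.List.max? values (fun s => PySem.Str.len s)).getD ""  -- max? is some: values ≠ []

def aggregate_attributes (attr_value_pairs : List (String × String)) : List (String × List String) :=
  let grouped : PySem.Dict String (List String) :=
    attr_value_pairs.foldl (fun d p => d.modify p.1 [] (fun l => l ++ [p.2])) PySem.Dict.empty
  let result : PySem.Dict String (List String) :=
    grouped.items.foldl (fun r item =>
      let deduped := deduplicate_values item.2
      if deduped = [] then r
      else if PySem.Set.contains SINGLE_VALUED_ATTRS item.1 then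
        r.insert item.1 [pick_best_single_value deduped]
      else
        r.insert item.1 deduped) PySem.Dict.empty
  result.items

-- ===== PORT B =====
def unique_values (values : List String) : List String :=
  (values.foldl (fun (st : PySem.Set String × List String) value =>
      let value := PySem.Str.strip value
      let value_lower := PySem.Str.lower value
      if !(value == "") && !(PySem.Set.contains st.1 value_lower) then
        (PySem.Set.add st.1 value_lower, st.2 ++ [value])
      else st) (PySem.Set.empty, [])).2

def survivors (unique : List String) : List String :=
  let ordered := PySem.List.sorted unique (fun s => PySem.Str.len s) true
  ordered.filter (fun v => !(ordered.any (fun u =>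
    PySem.Str.isIn (PySem.Str.lower v) (PySem.Str.lower u) &&
      !(PySem.Str.lower v == PySem.Str.lower u))))

def aggregate_attributes_alt (attr_value_pairs : List (String × String)) : List (String × List String) :=
  let grouped : PySem.Dict String (List String) :=
    attr_value_pairs.foldl (fun d p => d.modify p.1 [] (fun l => l ++ [p.2])) PySem.Dict.empty
  (grouped.items.foldl (fun (r : PySem.Dict String (List String)) item =>
      let keep := survivors (unique_values item.2)
      if keep = [] then r
      else if PySem.Set.contains SINGLE_VALUED_ATTRS item.1 then
        r.insert item.1 [(PySem.List.max? keep (fun s => PySem.Str.len s)).getD ""]  -- max? is some: keep ≠ []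
      else
        r.insert item.1 keep) PySem.Dict.empty).items

-- ===== PRECONDITION & SPEC =====
def Spec_aggregate_attributes (attr_value_pairs : List (String × String)) (out : List (String × List String)) : Prop := out = aggregate_attributes_alt attr_value_pairs
instance (attr_value_pairs : List (String × String)) (out : List (String × List String)) : Decidable (Spec_aggregate_attributes attr_value_pairs out) := by unfold Spec_aggregate_attributes; infer_instance

-- ===== CLAIM (what is proved, stated in full; the proofs are below) =====
def Claim_equal_aggregate_attributes : Prop := ∀ (attr_value_pairs : List (String × String)), Dom_aggregate_attributes attr_value_pairs → Spec_aggregate_attributes attr_value_pairs (aggregate_attributes attr_value_pairs)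

-- ===== LEMMAS AND PROOFS =====

-- "value's lowercase form is a proper substring of accepted's lowercase form"
def subB (v u : String) : Bool :=
  PySem.Str.isIn (PySem.Str.lower v) (PySem.Str.lower u) &&
    !(PySem.Str.lower v == PySem.Str.lower u)

-- one step of A's greedy absorption loop
def gstep (kept : List String) (value : String) : List String :=
  if kept.any (fun a => subB value a) then kept else kept ++ [value]

theorem subB_iff (v u : String) :
    subB v u = true ↔
      (PySem.Str.lower v).toList <:+: (PySem.Str.lower u).toList ∧
        PySem.Str.lower v ≠ PySem.Str.lower u := by
  simp [subB, PySem.Chars.isIn_iff_infix]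
theorem subB_length {a b : String} (h : subB a b = true) :
    (PySem.Str.lower a).toList.length < (PySem.Str.lower b).toList.length := by
  rw [subB_iff] at h
  obtain ⟨hinf, hne⟩ := h
  rcases Nat.lt_or_ge (PySem.Str.lower a).toList.length (PySem.Str.lower b).toList.length with h | h
  · exact h
  · exfalso
    have hle := hinf.sublist.length_le
    have : (PySem.Str.lower a).toList = (PySem.Str.lower b).toList :=
      hinf.sublist.eq_of_length (le_antisymm hle h)
    exact hne (String.toList_inj.mp this)
theorem lower_length (s : String) : (PySem.Str.lower s).toList.length = s.toList.length := by
  simp [PySem.Str.toList_lower, PySem.Chars.lower]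
theorem len_eq' (s : String) : PySem.Str.len s = (s.toList.length : Int) := by simp
theorem subB_len {a b : String} (h : subB a b = true) :
    PySem.Str.len a < PySem.Str.len b := by
  rw [len_eq', len_eq', ← lower_length a, ← lower_length b]
  exact_mod_cast subB_length h
theorem subB_trans {a b c : String} (h1 : subB a b = true) (h2 : subB b c = true) :
    subB a c = true := by
  rw [subB_iff] at h1 h2 ⊢
  refine ⟨h1.1.trans h2.1, fun he => ?_⟩
  have := subB_length (a := a) (b := b) (by rw [subB_iff]; exact h1)
  have := subB_length (a := b) (b := c) (by rw [subB_iff]; exact h2)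
  have : (PySem.Str.lower a).toList.length < (PySem.Str.lower c).toList.length := by omega
  rw [he] at this; omega
theorem mem_gstep {kept : List String} {v w : String} (h : w ∈ kept) : w ∈ gstep kept v := by
  simp only [gstep]; split <;> simp [h]
theorem mem_foldl_gstep {l acc : List String} {w : String}
    (h : w ∈ l.foldl gstep acc) : w ∈ acc ∨ w ∈ l := by
  induction l generalizing acc with
  | nil => exact Or.inl h
  | cons x t ih =>
    rcases ih h with h' | h'
    · simp only [gstep] at h'
      split at h' <;> simp_all <;> tauto
    · simp [h']
theorem greedy_absorb (l : List String) (x : String)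
    (h : ∃ u ∈ l, subB x u = true) : ∃ w ∈ l.foldl gstep [], subB x w = true := by
  induction l using List.reverseRecOn with
  | nil => simp at h
  | append_singleton t y ih =>
    rw [List.foldl_append, List.foldl_cons, List.foldl_nil]
    rcases h with ⟨u, hu, hsub⟩
    rcases List.mem_append.mp hu with hu | hu
    · obtain ⟨w, hw, hws⟩ := ih ⟨u, hu, hsub⟩
      exact ⟨w, mem_gstep hw, hws⟩
    · simp only [List.mem_singleton] at hu; subst hu
      by_cases hany : (t.foldl gstep []).any (fun a => subB u a) = true
      · obtain ⟨w, hw, hws⟩ := List.any_eq_true.mp hany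
        exact ⟨w, mem_gstep hw, subB_trans hsub hws⟩
      · exact ⟨u, by simp [gstep, hany], hsub⟩
theorem subB_self (v : String) : subB v v = false := by
  simp [subB]
theorem greedy_eq_filter (l : List String)
    (h : l.Pairwise (fun a b => PySem.Str.len b ≤ PySem.Str.len a)) :
    l.foldl gstep [] = l.filter (fun v => !(l.any (fun u => subB v u))) := by
  induction l using List.reverseRecOn with
  | nil => rfl
  | append_singleton t x ih =>
    rw [List.pairwise_append] at h
    obtain ⟨ht, -, hx⟩ := h
    have hxle : ∀ a ∈ t, PySem.Str.len x ≤ PySem.Str.len a := by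
      intro a ha; exact hx a ha x (List.mem_singleton_self x)
    have hnx : ∀ v ∈ t, subB v x = false := by
      intro v hv
      by_contra hc
      have : subB v x = true := by revert hc; cases subB v x <;> simp
      exact absurd (hxle v hv) (not_le.mpr (subB_len this))
    have hfilter : (t.filter (fun v => !((t ++ [x]).any (fun u => subB v u))))
        = t.filter (fun v => !(t.any (fun u => subB v u))) := by
      apply List.filter_congr
      intro v hv
      simp [List.any_append, hnx v hv]
    have hany : ((t.foldl gstep []).any (fun a => subB x a)) = t.any (fun u => subB x u) := by
      by_cases ht' : t.any (fun u => subB x u) = true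
      · obtain ⟨u, hu, hus⟩ := List.any_eq_true.mp ht'
        obtain ⟨w, hw, hws⟩ := greedy_absorb t x ⟨u, hu, hus⟩
        rw [ht']
        exact List.any_eq_true.mpr ⟨w, hw, hws⟩
      · have ht'' : t.any (fun u => subB x u) = false := by
          revert ht'; cases t.any (fun u => subB x u) <;> simp
        rw [ht'']
        apply List.any_eq_false.mpr
        intro w hw
        rcases mem_foldl_gstep hw with h' | h'
        · simp at h'
        · exact (List.any_eq_false.mp ht'') w h'
    rw [List.foldl_append, List.foldl_cons, List.foldl_nil]
    simp only [gstep, hany]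
    rw [List.filter_append, hfilter, ih ht]
    by_cases hc : t.any (fun u => subB x u) = true
    · simp [hc, List.any_append, subB_self]
    · have hc' : t.any (fun u => subB x u) = false := by
        revert hc; cases t.any (fun u => subB x u) <;> simp
      simp [hc', List.any_append, subB_self]
theorem survivors_eq_greedy (unique : List String) :
    survivors unique =
      (PySem.List.sorted unique (fun s => PySem.Str.len s) true).foldl gstep [] :=
  (greedy_eq_filter _ (PySem.List.sorted_pairwise_rev unique _)).symm
theorem unique_eq (values : List String) :
    (values.foldl (fun (st : PySem.Set String × List String) value =>
      let value := PySem.Str.strip value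
      if value = "" then st
      else
        let value_lower := PySem.Str.lower value
        if PySem.Set.contains st.1 value_lower then st
        else (PySem.Set.add st.1 value_lower, st.2 ++ [value])) (PySem.Set.empty, [])).2
    = unique_values values := by
  unfold unique_values
  congr 1
  apply PySem.List.foldl_congr_mem
  intro st value _
  by_cases h1 : PySem.Str.strip value = "" <;>
    by_cases h2 : PySem.Set.contains st.1 (PySem.Str.lower (PySem.Str.strip value)) = true <;>
      simp [h1, h2]

theorem dedup_eq (values : List String) :
    deduplicate_values values = survivors (unique_values values) := by
  unfold deduplicate_values
  by_cases hv : values = []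
  · subst hv; rfl
  · simp only [hv, if_false, unique_eq]
    by_cases hlen : (unique_values values).length ≤ 1
    · simp only [hlen, if_true]
      rcases hu : unique_values values with _ | ⟨x, t⟩
      · rfl
      · have ht : t = [] := by
          rw [hu] at hlen; simpa using hlen
        subst ht
        rw [survivors_eq_greedy]
        have hsort : PySem.List.sorted [x] (fun s => PySem.Str.len s) true = [x] :=
          PySem.List.sorted_rev_eq_self_of_pairwise _ _ (List.pairwise_singleton _ x)
        rw [hsort]
        simp [gstep]
    · simp only [hlen, if_false]
      rw [survivors_eq_greedy]
      rfl

theorem pick_eq {k : List String} (hk : k ≠ []) :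
    pick_best_single_value k = (PySem.List.max? k (fun s => PySem.Str.len s)).getD "" := by
  simp [pick_best_single_value, hk]

theorem agg_eq (attr_value_pairs : List (String × String)) :
    aggregate_attributes attr_value_pairs = aggregate_attributes_alt attr_value_pairs := by
  unfold aggregate_attributes aggregate_attributes_alt
  dsimp only
  congr 1
  apply PySem.List.foldl_congr_mem
  intro r item _
  simp only [dedup_eq]
  by_cases hk : survivors (unique_values item.2) = []
  · simp [hk]
  · simp [hk, pick_eq hk]

-- ===== VERDICT (by name: the statement is the Claim_ definition above) =====
theorem aggregate_attributes_spec : Claim_equal_aggregate_attributes := by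
  intro attr_value_pairs _
  unfold Spec_aggregate_attributes
  exact agg_eq attr_value_pairs
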